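-- pv_equiv track=rewrite | github.com/pranavchavda/espressobot | simple_agent.py | analyze_and_create_custom_tasks
-- ===== SOURCE A (Python) =====
-- def analyze_and_create_custom_tasks(user_message):
--     """Analyze user message and create appropriate custom tasks."""
--     message_lower = user_message.lower()
--     tasks = []
--
--     # Product/listing related tasks
--     if any(word in message_lower for word in ["product", "listing", "create", "add", "new"]):
--         tasks.extend([
--             "Analyze the user's request and gather requirements",
--             "Search for existing similar products or information",
--             "Create or prepare the main deliverable",
--             "Review and finalize the result"
--         ])
--
--     # Research/analysis tasks
--     elif any(word in message_lower for word in ["research", "analyze", "find", "search", "compare"]):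
--         tasks.extend([
--             "Understand the research requirements",
--             "Gather relevant information from available sources",
--             "Analyze and organize the findings",
--             "Present the research results"
--         ])
--
--     # Update/modification tasks
--     elif any(word in message_lower for word in ["update", "modify", "change", "edit", "fix"]):
--         tasks.extend([
--             "Identify what needs to be updated or modified",
--             "Gather current state and requirements",
--             "Make the necessary changes",
--             "Verify the changes are correct"
--         ])
--
--     # Complex multi-step requests
--     elif any(phrase in message_lower for phrase in ["help me", "can you", "step by step", "guide"]):
--         tasks.extend([
--             "Break down the user's request into steps",
--             "Gather necessary information and resources",
--             "Execute the main tasks",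
--             "Provide final results and next steps"
--         ])
--
--     # Generic fallback for any complex request
--     else:
--         tasks.extend([
--             "Analyze and understand the user's request",
--             "Plan the approach and gather needed information",
--             "Execute the main task or provide the requested information",
--             "Review and finalize the response"
--         ])
--
--     return tasks
-- ===== SOURCE B (Python) =====
-- # Flat keyword->group-index scan with a running minimum instead of an if/elif
-- # chain of per-group any() tests; the winning (lowest) group indexes a task table.
--
-- TASK_LISTS = [
--     ["Analyze the user's request and gather requirements",
--      "Search for existing similar products or information",
--      "Create or prepare the main deliverable",
--      "Review and finalize the result"],
--     ["Understand the research requirements",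
--      "Gather relevant information from available sources",
--      "Analyze and organize the findings",
--      "Present the research results"],
--     ["Identify what needs to be updated or modified",
--      "Gather current state and requirements",
--      "Make the necessary changes",
--      "Verify the changes are correct"],
--     ["Break down the user's request into steps",
--      "Gather necessary information and resources",
--      "Execute the main tasks",
--      "Provide final results and next steps"],
--     ["Analyze and understand the user's request",
--      "Plan the approach and gather needed information",
--      "Execute the main task or provide the requested information",
--      "Review and finalize the response"],
-- ]
--
-- KEYWORD_INDEX = [
--     ("product", 0), ("listing", 0), ("create", 0), ("add", 0), ("new", 0),
--     ("research", 1), ("analyze", 1), ("find", 1), ("search", 1), ("compare", 1),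
--     ("update", 2), ("modify", 2), ("change", 2), ("edit", 2), ("fix", 2),
--     ("help me", 3), ("can you", 3), ("step by step", 3), ("guide", 3),
-- ]
--
--
-- def analyze_and_create_custom_tasks(user_message):
--     """Analyze user message and create appropriate custom tasks."""
--     message_lower = user_message.lower()
--     best = 4  # index of the generic fallback task list
--     for keyword, group in KEYWORD_INDEX:
--         if keyword in message_lower:
--             best = min(best, group)
--     return list(TASK_LISTS[best])
-- ===== Notes on version B (the rewrite author's own statement) =====
-- stated objective: alternative
-- what changed: Replaced the if/elif chain of per-group any() tests (first-match short-circuit) by a single unconditional pass over a flat keyword-to-group-index list that keeps the minimum matched group index, which then indexes a table of task lists (fallback = index 4).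
import Mathlib
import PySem

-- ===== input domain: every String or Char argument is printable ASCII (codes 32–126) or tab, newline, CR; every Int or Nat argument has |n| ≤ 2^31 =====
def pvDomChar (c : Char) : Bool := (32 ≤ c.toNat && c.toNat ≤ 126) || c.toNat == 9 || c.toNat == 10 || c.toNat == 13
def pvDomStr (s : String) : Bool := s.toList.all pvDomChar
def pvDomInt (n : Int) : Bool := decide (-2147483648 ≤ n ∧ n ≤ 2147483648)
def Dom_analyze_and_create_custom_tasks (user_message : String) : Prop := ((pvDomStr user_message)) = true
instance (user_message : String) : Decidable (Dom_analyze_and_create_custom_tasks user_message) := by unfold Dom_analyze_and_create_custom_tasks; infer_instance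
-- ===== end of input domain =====

-- B replaces A's if/elif chain of per-group any() tests by one pass over a flat
-- keyword -> group-index list keeping the minimum matched group, then indexes a
-- task table (objective: alternative).


-- ===== PORT A =====
def analyze_and_create_custom_tasks (user_message : String) : List String :=
  let message_lower := PySem.Str.lower user_message
  let tasks : List String := []
  if ["product", "listing", "create", "add", "new"].any
      (fun word => PySem.Str.isIn word message_lower) then
    tasks ++
      ["Analyze the user's request and gather requirements",
       "Search for existing similar products or information",
       "Create or prepare the main deliverable",
       "Review and finalize the result"]
  else if ["research", "analyze", "find", "search", "compare"].any
      (fun word => PySem.Str.isIn word message_lower) then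
    tasks ++
      ["Understand the research requirements",
       "Gather relevant information from available sources",
       "Analyze and organize the findings",
       "Present the research results"]
  else if ["update", "modify", "change", "edit", "fix"].any
      (fun word => PySem.Str.isIn word message_lower) then
    tasks ++
      ["Identify what needs to be updated or modified",
       "Gather current state and requirements",
       "Make the necessary changes",
       "Verify the changes are correct"]
  else if ["help me", "can you", "step by step", "guide"].any
      (fun phrase => PySem.Str.isIn phrase message_lower) then
    tasks ++
      ["Break down the user's request into steps",
       "Gather necessary information and resources",
       "Execute the main tasks",
       "Provide final results and next steps"]
  else
    tasks ++
      ["Analyze and understand the user's request",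
       "Plan the approach and gather needed information",
       "Execute the main task or provide the requested information",
       "Review and finalize the response"]

-- ===== PORT B =====
def pvTaskLists : List (List String) :=
  [["Analyze the user's request and gather requirements",
    "Search for existing similar products or information",
    "Create or prepare the main deliverable",
    "Review and finalize the result"],
   ["Understand the research requirements",
    "Gather relevant information from available sources",
    "Analyze and organize the findings",
    "Present the research results"],
   ["Identify what needs to be updated or modified",
    "Gather current state and requirements",
    "Make the necessary changes",
    "Verify the changes are correct"],
   ["Break down the user's request into steps",
    "Gather necessary information and resources",
    "Execute the main tasks",
    "Provide final results and next steps"],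
   ["Analyze and understand the user's request",
    "Plan the approach and gather needed information",
    "Execute the main task or provide the requested information",
    "Review and finalize the response"]]

def pvKeywordIndex : List (String × Nat) :=
  [("product", 0), ("listing", 0), ("create", 0), ("add", 0), ("new", 0),
   ("research", 1), ("analyze", 1), ("find", 1), ("search", 1), ("compare", 1),
   ("update", 2), ("modify", 2), ("change", 2), ("edit", 2), ("fix", 2),
   ("help me", 3), ("can you", 3), ("step by step", 3), ("guide", 3)]

def analyze_and_create_custom_tasks_alt (user_message : String) : List String :=
  let message_lower := PySem.Str.lower user_message
  let best := pvKeywordIndex.foldl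
    (fun best kw => if PySem.Str.isIn kw.1 message_lower then min best kw.2 else best) 4
  pvTaskLists.getD best []

-- ===== PRECONDITION & SPEC =====
def Spec_analyze_and_create_custom_tasks (user_message : String) (out : List String) : Prop := out = analyze_and_create_custom_tasks_alt user_message
instance (user_message : String) (out : List String) : Decidable (Spec_analyze_and_create_custom_tasks user_message out) := by unfold Spec_analyze_and_create_custom_tasks; infer_instance

-- ===== CLAIM (what is proved, stated in full; the proofs are below) =====
def Claim_equal_analyze_and_create_custom_tasks : Prop := ∀ (user_message : String), Dom_analyze_and_create_custom_tasks user_message → Spec_analyze_and_create_custom_tasks user_message (analyze_and_create_custom_tasks user_message)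

-- ===== LEMMAS AND PROOFS =====

-- Folding B's min-accumulator over one group's keywords, all tagged with index i,
-- yields `min a i` exactly when some keyword of the group matches.
theorem pv_fold_group (m : String) (g : List String) (i a : Nat) :
    (g.map (fun kw => (kw, i))).foldl
        (fun best kw => if PySem.Str.isIn kw.1 m then min best kw.2 else best) a
      = if g.any (fun kw => PySem.Str.isIn kw m) then min a i else a := by
  induction g generalizing a with
  | nil => simp
  | cons kw rest ih =>
      simp only [List.map_cons, List.foldl_cons, List.any_cons]
      rw [ih]
      by_cases h : PySem.Str.isIn kw m = true
      · rw [if_pos h]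
        by_cases hr : (rest.any fun kw => PySem.Str.isIn kw m) = true
        · rw [if_pos hr, if_pos (by rw [h, Bool.true_or])]
          omega
        · rw [if_neg hr, if_pos (by rw [h, Bool.true_or])]
      · have h' : PySem.Str.isIn kw m = false := by
          cases hx : PySem.Str.isIn kw m
          · rfl
          · exact absurd hx h
        rw [if_neg h]; simp only [h', Bool.false_or]

-- ===== VERDICT (by name: the statement is the Claim_ definition above) =====
theorem analyze_and_create_custom_tasks_spec : Claim_equal_analyze_and_create_custom_tasks := by
  intro u _
  show _ = _
  have hflat : pvKeywordIndex
      = (["product", "listing", "create", "add", "new"].map (fun kw => (kw, 0)))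
        ++ (["research", "analyze", "find", "search", "compare"].map (fun kw => (kw, 1)))
        ++ (["update", "modify", "change", "edit", "fix"].map (fun kw => (kw, 2)))
        ++ (["help me", "can you", "step by step", "guide"].map (fun kw => (kw, 3))) := by
    rfl
  simp only [analyze_and_create_custom_tasks, analyze_and_create_custom_tasks_alt,
    hflat, List.foldl_append, pv_fold_group, List.nil_append]
  cases hb0 : (["product", "listing", "create", "add", "new"].any
      (fun kw => PySem.Str.isIn kw (PySem.Str.lower u))) <;>
  cases hb1 : (["research", "analyze", "find", "search", "compare"].any
      (fun kw => PySem.Str.isIn kw (PySem.Str.lower u))) <;>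
  cases hb2 : (["update", "modify", "change", "edit", "fix"].any
      (fun kw => PySem.Str.isIn kw (PySem.Str.lower u))) <;>
  cases hb3 : (["help me", "can you", "step by step", "guide"].any
      (fun kw => PySem.Str.isIn kw (PySem.Str.lower u))) <;>
  simp [pvTaskLists]
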